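-- pv_equiv track=rewrite | github.com/code-rag-bench/code-rag-bench | preprocessor/tutorials/clean_tutorials.py | remove_single_lines
-- ===== SOURCE A (Python) =====
-- def remove_single_lines(text: str) -> str:
--     lines = text.split('\n')
--     sidx = 0
--     while sidx < len(lines):
--         if len(lines[sidx].strip().split()) > 2: break
--         sidx += 1
--
--     eidx = len(lines) - 1
--     while eidx > -1:
--         if len(lines[eidx].strip().split()) > 2: break
--         eidx -= 1
--
--     sidx = len('\n'.join(lines[: sidx]))
--     eidx = len('\n'.join(lines[: eidx+1]))
--     return sidx, eidx
-- ===== SOURCE B (Python) =====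
-- def remove_single_lines(text: str):
--     lines = text.split('\n')
--     # prefix offset table: offsets[i] = len('\n'.join(lines[:i]))
--     offsets = [0]
--     cum = 0
--     for ln in lines:
--         cum += len(ln) + 1
--         offsets.append(cum - 1)
--     # one pass: first and last line index with more than 2 words
--     first = None
--     last = -1
--     for i, ln in enumerate(lines):
--         if len(ln.strip().split()) > 2:
--             if first is None:
--                 first = i
--             last = i
--     if first is None:
--         first = len(lines)
--     return offsets[first], offsets[last + 1]
-- ===== Notes on version B (the rewrite author's own statement) =====
-- stated objective: alternative
-- what changed: Replaces A's two while-loops plus two slice-and-join rebuilds by a precomputed prefix-offset table (running char count + newline per line) and a single enumerate pass recording the first and last substantial line indices, then indexes the table.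
import Mathlib
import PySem

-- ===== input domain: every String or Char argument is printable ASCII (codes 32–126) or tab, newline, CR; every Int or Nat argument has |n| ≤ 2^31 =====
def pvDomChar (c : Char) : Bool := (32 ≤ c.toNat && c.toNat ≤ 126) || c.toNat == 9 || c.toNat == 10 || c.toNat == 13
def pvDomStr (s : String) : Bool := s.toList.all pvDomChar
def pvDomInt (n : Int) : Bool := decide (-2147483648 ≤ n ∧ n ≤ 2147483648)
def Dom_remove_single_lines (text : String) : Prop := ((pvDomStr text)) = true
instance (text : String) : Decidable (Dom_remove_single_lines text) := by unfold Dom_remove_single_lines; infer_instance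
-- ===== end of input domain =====

-- B replaces A's two join-rebuilding while-loops by a prefix-offset table plus one
-- enumerate pass recording the first and last substantial line (objective: alternative).

-- ===== PORT A =====
-- first while loop: advance sidx while the stripped line has ≤ 2 words
def rslA_sidx : List String → Nat → Nat
  | [], s => s
  | l :: ls, s =>
    if (PySem.Str.split₀ (PySem.Str.strip l)).length > 2 then s else rslA_sidx ls (s + 1)

-- second while loop: eidx counts down from len-1 to -1; argument n is eidx+1
def rslA_eidx (lines : List String) : Nat → Int
  | 0 => -1
  | n + 1 =>
    if (PySem.Str.split₀ (PySem.Str.strip (lines.getD n ""))).length > 2 then (n : Int)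
    else rslA_eidx lines n

def remove_single_lines (text : String) : Int × Int :=
  let lines := (PySem.Str.split? text "\n").getD []   -- sep "\n" ≠ "", so split? is some
  let sidx := rslA_sidx lines 0
  let eidx := rslA_eidx lines lines.length
  (PySem.Str.len (PySem.Str.join "\n" (PySem.List.slice lines none (some (sidx : Int)))),
   PySem.Str.len (PySem.Str.join "\n" (PySem.List.slice lines none (some (eidx + 1)))))

-- ===== PORT B =====
-- offsets[i] = len('\n'.join(lines[:i])), built as a running sum of len(ln)+1
def rslB_offsets (lines : List String) : List Int :=
  (lines.foldl
    (fun (p : Int × List Int) ln =>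
      let c := p.1 + PySem.Str.len ln + 1
      (c, p.2 ++ [c - 1]))
    (0, [0])).2

-- one enumerate pass: (first substantial index or none, last substantial index or -1)
def rslB_scan (lines : List (Int × String)) (p : Option Int × Int) : Option Int × Int :=
  lines.foldl
    (fun p q =>
      if (PySem.Str.split₀ (PySem.Str.strip q.2)).length > 2 then
        ((if p.1.isNone then some q.1 else p.1), q.1)
      else p)
    p

def remove_single_lines_alt (text : String) : Int × Int :=
  let lines := (PySem.Str.split? text "\n").getD []   -- sep "\n" ≠ "", so split? is some
  let offsets := rslB_offsets lines
  let fl := rslB_scan (PySem.List.enumerate lines) (none, -1)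
  let first : Int := fl.1.getD (lines.length : Int)
  (offsets.getD first.toNat 0, offsets.getD (fl.2 + 1).toNat 0)

-- ===== PRECONDITION & SPEC =====
def Spec_remove_single_lines (text : String) (out : Int × Int) : Prop := out = remove_single_lines_alt text
instance (text : String) (out : Int × Int) : Decidable (Spec_remove_single_lines text out) := by unfold Spec_remove_single_lines; infer_instance

-- ===== CLAIM (what is proved, stated in full; the proofs are below) =====
def Claim_equal_remove_single_lines : Prop := ∀ (text : String), Dom_remove_single_lines text → Spec_remove_single_lines text (remove_single_lines text)

-- ===== LEMMAS AND PROOFS =====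

-- the shared "substantial line" test, as a Bool, for the lemma statements
def rslP (l : String) : Bool := (PySem.Str.split₀ (PySem.Str.strip l)).length > 2

-- index of the last substantial line, if any
def rslLast? : List String → Option Nat
  | [] => none
  | l :: ls =>
    match rslLast? ls with
    | some j => some (j + 1)
    | none => if rslP l then some 0 else none

-- sum of len(ln)+1 over a list of lines
def rslS (ls : List String) : Int := (ls.map (fun l => PySem.Str.len l + 1)).sum

theorem rslA_sidx_eq (ls : List String) (s : Nat) :
    rslA_sidx ls s = s + ((ls.findIdx? rslP).getD ls.length) := by
  induction ls generalizing s with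
  | nil => simp [rslA_sidx]
  | cons l ls ih =>
    by_cases h : (PySem.Str.split₀ (PySem.Str.strip l)).length > 2
    · simp [rslA_sidx, h, List.findIdx?_cons, rslP]
    · simp only [rslA_sidx, if_neg h, ih, List.findIdx?_cons,
        show rslP l = false by simpa [rslP] using h, Bool.false_eq_true, if_false]
      cases hf : ls.findIdx? rslP <;> simp [hf] <;> omega

theorem findIdx?_lt_length {α : Type} (p : α → Bool) (xs : List α) (j : Nat)
    (h : xs.findIdx? p = some j) : j < xs.length := by
  induction xs generalizing j with
  | nil => simp at h
  | cons x xs ih =>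
    rw [List.findIdx?_cons] at h
    split at h
    · simp at h; simp only [List.length_cons]; omega
    · cases hf : xs.findIdx? p with
      | none => simp [hf] at h
      | some k =>
        simp [hf] at h
        have := ih k hf
        simp only [List.length_cons]
        omega

theorem rslLast?_lt_length (ls : List String) (j : Nat) (h : rslLast? ls = some j) :
    j < ls.length := by
  induction ls generalizing j with
  | nil => simp [rslLast?] at h
  | cons l ls ih =>
    unfold rslLast? at h
    cases hf : rslLast? ls with
    | some k =>
      rw [hf] at h; simp at h
      have := ih k hf
      simp only [List.length_cons]; omega
    | none =>
      rw [hf] at h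
      split_ifs at h
      simp at h
      simp only [List.length_cons]; omega

theorem rslLast?_append_singleton (ls : List String) (x : String) :
    rslLast? (ls ++ [x]) = if rslP x then some ls.length else rslLast? ls := by
  induction ls with
  | nil => simp [rslLast?]
  | cons l ls ih =>
    simp only [List.cons_append, rslLast?, ih]
    split_ifs with h <;> simp

theorem rslA_eidx_eq (ls : List String) (n : Nat) (hn : n ≤ ls.length) :
    rslA_eidx ls n = match rslLast? (ls.take n) with | some j => (j : Int) | none => -1 := by
  induction n with
  | zero => simp [rslA_eidx, rslLast?]
  | succ m ih =>
    have hm : m < ls.length := by omega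
    have htake : ls.take (m + 1) = ls.take m ++ [ls[m]] := List.take_succ_eq_append_getElem hm
    have hget : ls.getD m "" = ls[m] := List.getD_eq_getElem ls "" hm
    unfold rslA_eidx
    rw [hget, htake, rslLast?_append_singleton]
    by_cases h : (PySem.Str.split₀ (PySem.Str.strip ls[m])).length > 2
    · rw [if_pos h, if_pos (show rslP ls[m] = true by simpa [rslP] using h)]
      simp [List.length_take, Nat.min_eq_left (Nat.le_of_lt hm)]
    · rw [if_neg h, if_neg (show ¬ rslP ls[m] = true by simpa [rslP] using h), ih (by omega)]

theorem rslB_scan_fst_some (ls : List (Int × String)) (j : Int) (e : Int) :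
    (rslB_scan ls (some j, e)).1 = some j := by
  induction ls generalizing e with
  | nil => simp [rslB_scan]
  | cons q ls ih =>
    by_cases h : (PySem.Str.split₀ (PySem.Str.strip q.2)).length > 2
    · simp only [rslB_scan, List.foldl_cons, if_pos h, Option.isNone_some,
        Bool.false_eq_true, if_false]
      exact ih _
    · simp only [rslB_scan, List.foldl_cons, if_neg h]
      exact ih _

theorem rslB_scan_fst (ls : List String) (k : Int) (e : Int) :
    (rslB_scan (PySem.List.enumerate ls k) (none, e)).1
      = (ls.findIdx? rslP).map (fun i => k + i) := by
  induction ls generalizing k e with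
  | nil => simp [rslB_scan, PySem.List.enumerate_nil]
  | cons l ls ih =>
    rw [PySem.List.enumerate_cons, List.findIdx?_cons]
    by_cases h : (PySem.Str.split₀ (PySem.Str.strip l)).length > 2
    · simp only [rslB_scan, List.foldl_cons, if_pos h, Option.isNone_none, if_true]
      rw [show (List.foldl (fun p q =>
            if (PySem.Str.split₀ (PySem.Str.strip q.2)).length > 2 then
              ((if p.1.isNone then some q.1 else p.1), q.1)
            else p) (some k, k) (PySem.List.enumerate ls (k + 1)))
            = rslB_scan (PySem.List.enumerate ls (k + 1)) (some k, k) from rfl,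
        rslB_scan_fst_some]
      simp [show rslP l = true by simpa [rslP] using h]
    · simp only [rslB_scan, List.foldl_cons, if_neg h]
      rw [show (List.foldl (fun p q =>
            if (PySem.Str.split₀ (PySem.Str.strip q.2)).length > 2 then
              ((if p.1.isNone then some q.1 else p.1), q.1)
            else p) (none, e) (PySem.List.enumerate ls (k + 1)))
            = rslB_scan (PySem.List.enumerate ls (k + 1)) (none, e) from rfl, ih]
      simp only [show rslP l = false by simpa [rslP] using h, Bool.false_eq_true, if_false]
      cases ls.findIdx? rslP <;> simp <;> ring

theorem rslB_scan_snd (ls : List String) (k : Int) (p : Option Int) (e : Int) :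
    (rslB_scan (PySem.List.enumerate ls k) (p, e)).2
      = match rslLast? ls with | some j => k + j | none => e := by
  induction ls generalizing k p e with
  | nil => simp [rslB_scan, PySem.List.enumerate_nil, rslLast?]
  | cons l ls ih =>
    rw [PySem.List.enumerate_cons]
    by_cases h : (PySem.Str.split₀ (PySem.Str.strip l)).length > 2
    · simp only [rslB_scan, List.foldl_cons, if_pos h]
      rw [show (List.foldl (fun p q =>
            if (PySem.Str.split₀ (PySem.Str.strip q.2)).length > 2 then
              ((if p.1.isNone then some q.1 else p.1), q.1)
            else p) ((if p.isNone then some k else p), k) (PySem.List.enumerate ls (k + 1)))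
            = rslB_scan (PySem.List.enumerate ls (k + 1)) ((if p.isNone then some k else p), k) from rfl]
      rw [show rslB_scan (PySem.List.enumerate ls (k + 1)) ((if p.isNone then some k else p), k)
            = ((rslB_scan (PySem.List.enumerate ls (k + 1)) ((if p.isNone then some k else p), k)).1,
               (rslB_scan (PySem.List.enumerate ls (k + 1)) ((if p.isNone then some k else p), k)).2) from rfl]
      cases hf : rslLast? ls <;>
        simp [ih, hf, rslLast?, show rslP l = true by simpa [rslP] using h] <;>
        push_cast <;> ring
    · simp only [rslB_scan, List.foldl_cons, if_neg h]
      rw [show (List.foldl (fun p q =>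
            if (PySem.Str.split₀ (PySem.Str.strip q.2)).length > 2 then
              ((if p.1.isNone then some q.1 else p.1), q.1)
            else p) (p, e) (PySem.List.enumerate ls (k + 1)))
            = rslB_scan (PySem.List.enumerate ls (k + 1)) (p, e) from rfl]
      cases hf : rslLast? ls <;>
        simp [ih, hf, rslLast?, show rslP l = false by simpa [rslP] using h] <;>
        push_cast <;> ring

theorem rslS_cons (l : String) (t : List String) :
    rslS (l :: t) = PySem.Str.len l + 1 + rslS t := by
  simp [rslS]

theorem rslB_offsets_fold (ls : List String) (c : Int) (offs : List Int) :
    (ls.foldl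
      (fun (p : Int × List Int) ln =>
        let c := p.1 + PySem.Str.len ln + 1
        (c, p.2 ++ [c - 1]))
      (c, offs))
      = (c + rslS ls, offs ++ (List.range ls.length).map (fun j => c + rslS (ls.take (j + 1)) - 1)) := by
  induction ls generalizing c offs with
  | nil => simp [rslS]
  | cons l ls ih =>
    simp only [List.foldl_cons, ih, Prod.mk.injEq]
    refine ⟨by rw [rslS_cons]; ring, ?_⟩
    rw [List.length_cons, List.range_succ_eq_map, List.map_cons, List.map_map,
      List.append_assoc, List.singleton_append]
    refine congrArg (offs ++ ·) (congrArg₂ List.cons ?_ ?_)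
    · rw [show rslS ((l :: ls).take (0 + 1)) = PySem.Str.len l + 1 by simp [rslS]]
      ring
    · apply List.map_congr_left
      intro j hj
      simp only [Function.comp_apply, List.take_succ_cons, rslS_cons]
      ring

theorem rsl_join_len (x : String) (xs : List String) :
    PySem.Str.len (PySem.Str.join "\n" (x :: xs)) = rslS (x :: xs) - 1 := by
  induction xs generalizing x with
  | nil =>
    simp [PySem.Str.len_eq, PySem.Str.toList_join, PySem.Chars.join_singleton, rslS]
  | cons y ys ih =>
    have h1 : (PySem.Str.join "\n" (x :: y :: ys)).toList
        = x.toList ++ "\n".toList ++ (PySem.Chars.join "\n".toList (List.map String.toList (y :: ys))) := by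
      rw [PySem.Str.toList_join]; simp [PySem.Chars.join_cons_cons]
    have h2 := ih y
    rw [PySem.Str.len_eq, PySem.Str.toList_join] at h2
    rw [PySem.Str.len_eq, h1]
    simp only [List.length_append, show ("\n".toList) = ['\n'] from rfl, List.length_singleton]
    simp only [rslS, List.map_cons, List.sum_cons, PySem.Str.len_eq] at h2 ⊢
    push_cast at h2 ⊢
    omega

theorem rslB_offsets_getD (ls : List String) (i : Nat) (hi : i ≤ ls.length) :
    (rslB_offsets ls).getD i 0 = PySem.Str.len (PySem.Str.join "\n" (ls.take i)) := by
  unfold rslB_offsets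
  rw [rslB_offsets_fold]
  cases i with
  | zero =>
    simp [PySem.Str.len_eq, PySem.Str.toList_join, PySem.Chars.join_nil]
  | succ j =>
    have hj : j < ls.length := by omega
    show ([(0 : Int)] ++ (List.range ls.length).map
        (fun j => 0 + rslS (ls.take (j + 1)) - 1)).getD (j + 1) 0 = _
    rw [List.singleton_append, List.getD_cons_succ,
      List.getD_eq_getElem _ _ (by simpa using hj)]
    simp only [List.getElem_map, List.getElem_range]
    cases ls with
    | nil => simp at hj
    | cons a as =>
      rw [show (a :: as).take (j + 1) = a :: as.take j from rfl, rsl_join_len]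
      ring

theorem rsl_body_eq (ls : List String) :
    (PySem.Str.len (PySem.Str.join "\n" (PySem.List.slice ls none (some ((rslA_sidx ls 0 : Nat) : Int)))),
     PySem.Str.len (PySem.Str.join "\n" (PySem.List.slice ls none (some (rslA_eidx ls ls.length + 1)))))
    = (let offsets := rslB_offsets ls
       let fl := rslB_scan (PySem.List.enumerate ls) (none, -1)
       let first : Int := fl.1.getD (ls.length : Int)
       (offsets.getD first.toNat 0, offsets.getD (fl.2 + 1).toNat 0)) := by
  simp only
  have hfst := rslB_scan_fst ls 0 (-1)
  have hsnd := rslB_scan_snd ls 0 none (-1)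
  have hsidx := rslA_sidx_eq ls 0
  have heidx := rslA_eidx_eq ls ls.length (le_refl _)
  rw [List.take_length] at heidx
  simp only [Prod.mk.injEq]
  constructor
  · -- first components
    have hs : ∃ s : Nat, s ≤ ls.length ∧ rslA_sidx ls 0 = s ∧
        ((rslB_scan (PySem.List.enumerate ls) (none, -1)).1.getD (ls.length : Int)).toNat = s := by
      cases hf : ls.findIdx? rslP with
      | none =>
        exact ⟨ls.length, le_refl _, by simp [hsidx, hf], by simp [hfst, hf]⟩
      | some j =>
        exact ⟨j, Nat.le_of_lt (findIdx?_lt_length _ _ _ hf), by simp [hsidx, hf],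
          by simp [hfst, hf]⟩
    obtain ⟨s, hsle, h1, h2⟩ := hs
    rw [h1, h2, PySem.List.slice_to ls (by positivity), Int.toNat_natCast,
      rslB_offsets_getD ls s hsle]
  · -- second components
    have he : ∃ i : Nat, i ≤ ls.length ∧ rslA_eidx ls ls.length + 1 = (i : Int) ∧
        ((rslB_scan (PySem.List.enumerate ls) (none, -1)).2 + 1).toNat = i := by
      cases hf : rslLast? ls with
      | none =>
        exact ⟨0, Nat.zero_le _, by simp [heidx, hf], by simp [hsnd, hf]⟩
      | some j =>
        refine ⟨j + 1, rslLast?_lt_length ls j hf, ?_, ?_⟩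
        · simp [heidx, hf]
        · simp [hsnd, hf]
    obtain ⟨i, hile, h1, h2⟩ := he
    rw [h1, h2, PySem.List.slice_to ls (by positivity), Int.toNat_natCast,
      rslB_offsets_getD ls i hile]

-- ===== VERDICT (by name: the statement is the Claim_ definition above) =====
theorem remove_single_lines_spec : Claim_equal_remove_single_lines := by
  intro text _
  unfold Spec_remove_single_lines remove_single_lines remove_single_lines_alt
  exact rsl_body_eq ((PySem.Str.split? text "\n").getD [])
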